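-- pv_equiv track=rewrite | github.com/Ivan020121/EpilepsyEEG | EpiSight/utils.py | get_channel_labels
-- ===== SOURCE A (Python) =====
-- def get_channel_labels(channels, bipolar):
--     """
--     获取通道列表。
--
--     Parameters:
--         channels (dict): 包含通道名称（键）及对应位置（值）的字典，值从1开始。
--                          - bipolar=False: 如 {'Fp1': 1, 'Fp2': 2, ...}
--                          - bipolar=True: 如 {'Fp2-F4': 1, 'F4-C4': 2, ...}
--         bipolar (bool): 是否为双极通道配置。
--                         - True: 使用双极通道键。
--                         - False: 使用单极通道键。
--
--     Returns:
--         list: 根据 `channels` 值（从1开始）排序的通道名列表，缺失位置用 None 填充。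
--     """
--     if bipolar:
--         # 双极通道的所有可能名称
--         all_possible_channels = [
--             'Fp2-F4', 'F4-C4', 'C4-P4', 'P4-O2',
--             'Fp1-F3', 'F3-C3', 'C3-P3', 'P3-O1',
--             'Fp2-F8', 'F8-T4', 'T4-T6', 'T6-O2',
--             'Fp1-F7', 'F7-T3', 'T3-T5', 'T5-O1',
--             'Fz-Cz', 'Cz-Pz'
--         ]
--     else:
--         # 单极通道的所有可能名称
--         all_possible_channels = [
--             "Fp1", "Fp2", "F3", "F4", "F7", "F8", "Fz",
--             "C3", "C4", "Cz", "T3", "T5", "T4", "T6",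
--             "P3", "P4", "Pz", "O1", "O2"
--         ]
--
--     # 获取需要的列表长度（最大值 + 1）
--     max_index = max(channels.values()) if channels else 0
--     channel_labels = [None] * max_index  # 初始化长度为最大索引值的列表（从1开始）
--
--     # 根据 `channels` 填充结果，为了对齐 Python 索引，需将索引减1
--     for key, idx in channels.items():
--         if 1 <= idx <= max_index:  # 确保索引合法（从1开始）
--             channel_labels[idx - 1] = key  # 将索引减1，以对齐 Python 的0索引
--
--     return channel_labels
-- ===== SOURCE B (Python) =====
-- def get_channel_labels(channels, bipolar):
--     # Sort (position, key) pairs by position (stable, so later duplicates stay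
--     # later), then build the result in one left-to-right scan, emitting None
--     # for every gap between consecutive positions; an adjacent duplicate
--     # position simply overwrites the last emitted slot (last write wins).
--     pairs = sorted(((idx, key) for key, idx in channels.items() if idx >= 1),
--                    key=lambda p: p[0])
--     out = []
--     for idx, key in pairs:
--         if idx > len(out):
--             out.extend([None] * (idx - 1 - len(out)))
--             out.append(key)
--         else:
--             out[-1] = key
--     return out
-- ===== Notes on version B (the rewrite author's own statement) =====
-- stated objective: alternative
-- what changed: Replaces preallocate-then-random-access-write (a None list of size max(values) indexed by each entry) with sort-then-scan: the (position,key) pairs are stably sorted by position and the result list is emitted left to right in one scan, padding gaps with None and letting adjacent duplicates overwrite the last slot.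
import Mathlib
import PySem

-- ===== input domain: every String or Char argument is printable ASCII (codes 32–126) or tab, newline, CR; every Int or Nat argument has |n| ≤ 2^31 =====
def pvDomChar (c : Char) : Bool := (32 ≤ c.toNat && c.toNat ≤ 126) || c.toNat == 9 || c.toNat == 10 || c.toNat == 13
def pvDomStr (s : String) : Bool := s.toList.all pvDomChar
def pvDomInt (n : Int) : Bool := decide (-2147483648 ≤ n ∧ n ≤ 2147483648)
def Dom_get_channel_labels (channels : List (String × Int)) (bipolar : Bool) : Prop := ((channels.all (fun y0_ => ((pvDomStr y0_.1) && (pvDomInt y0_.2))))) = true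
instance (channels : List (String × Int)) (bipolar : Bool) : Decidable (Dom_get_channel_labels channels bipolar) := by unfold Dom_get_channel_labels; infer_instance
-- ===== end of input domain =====

-- B replaces A's preallocated None-list with random-access slot writes by sort-then-scan:
-- stably sort the (position, key) pairs and emit the result left to right, padding gaps
-- with None (objective: alternative algorithm, similar cost).

-- ===== PORT A =====
def get_channel_labels (channels : List (String × Int)) (bipolar : Bool) : List (Option String) :=
  let _all_possible_channels : List String :=
    if bipolar then
      ["Fp2-F4", "F4-C4", "C4-P4", "P4-O2",
       "Fp1-F3", "F3-C3", "C3-P3", "P3-O1",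
       "Fp2-F8", "F8-T4", "T4-T6", "T6-O2",
       "Fp1-F7", "F7-T3", "T3-T5", "T5-O1",
       "Fz-Cz", "Cz-Pz"]
    else
      ["Fp1", "Fp2", "F3", "F4", "F7", "F8", "Fz",
       "C3", "C4", "Cz", "T3", "T5", "T4", "T6",
       "P3", "P4", "Pz", "O1", "O2"]
  let max_index : Int :=
    if channels.isEmpty then 0 else (PySem.List.max? (channels.map Prod.snd) (fun y => y)).getD 0
  let channel_labels : List (Option String) := List.replicate max_index.toNat none
  channels.foldl
    (fun acc kv =>
      if 1 ≤ kv.2 ∧ kv.2 ≤ max_index then acc.set (kv.2 - 1).toNat (some kv.1) else acc)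
    channel_labels

-- ===== PORT B =====
-- one step of Source B's scan loop; 'out[-1] = key' is out.set (out.length - 1): in that branch
-- 1 ≤ idx ≤ len(out) (the pairs are filtered to idx ≥ 1), so out is nonempty and Python's
-- -1 index is exactly the last slot.
def pvScanStep (out : List (Option String)) (p : Int × String) : List (Option String) :=
  if (out.length : Int) < p.1 then
    out ++ List.replicate (p.1 - 1 - (out.length : Int)).toNat none ++ [some p.2]
  else
    out.set (out.length - 1) (some p.2)

def get_channel_labels_alt (channels : List (String × Int)) (bipolar : Bool) : List (Option String) :=
  let pairs : List (Int × String) :=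
    PySem.List.sorted ((channels.filter (fun kv => 1 ≤ kv.2)).map (fun kv => (kv.2, kv.1)))
      (fun p => p.1) false
  pairs.foldl pvScanStep []

-- ===== PRECONDITION & SPEC =====
def Spec_get_channel_labels (channels : List (String × Int)) (bipolar : Bool) (out : List (Option String)) : Prop := out = get_channel_labels_alt channels bipolar
instance (channels : List (String × Int)) (bipolar : Bool) (out : List (Option String)) : Decidable (Spec_get_channel_labels channels bipolar out) := by unfold Spec_get_channel_labels; infer_instance

-- ===== CLAIM (what is proved, stated in full; the proofs are below) =====
def Claim_equal_get_channel_labels : Prop := ∀ (channels : List (String × Int)) (bipolar : Bool), Dom_get_channel_labels channels bipolar → Spec_get_channel_labels channels bipolar (get_channel_labels channels bipolar)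

-- ===== LEMMAS AND PROOFS =====

-- "last write wins" over (position, key) pairs from accumulator a: the value B's key order
-- leaves at position v
def pvLastF (l : List (Int × String)) (v : Int) (a : Option String) : Option String :=
  l.foldl (fun acc p => if p.1 = v then some p.2 else acc) a

-- the length Source B's scan has produced after consuming a sorted list s
def pvLastIdx (s : List (Int × String)) : Nat :=
  ((s.getLast?).map (fun p => p.1.toNat)).getD 0

-- A's fill loop preserves the length of the slot list.
theorem pvFillLen (m : Int) (channels : List (String × Int)) (acc : List (Option String)) :
    (channels.foldl
      (fun acc kv =>
        if 1 ≤ kv.2 ∧ kv.2 ≤ m then acc.set (kv.2 - 1).toNat (some kv.1) else acc)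
      acc).length = acc.length := by
  induction channels generalizing acc with
  | nil => rfl
  | cons kv rest ih =>
      simp only [List.foldl_cons]
      split_ifs <;> rw [ih] <;> simp

-- Main A-side invariant: slot j of A's fill equals the last-write-wins value at position j+1.
theorem pvFillInv (m : Int) (channels : List (String × Int)) (acc : List (Option String))
    (g : Int → Option String) (hlen : acc.length = m.toNat)
    (hbase : ∀ j : Nat, j < m.toNat → acc[j]? = some (g ((j : Int) + 1))) :
    ∀ j : Nat, j < m.toNat →
      (channels.foldl
        (fun acc kv =>
          if 1 ≤ kv.2 ∧ kv.2 ≤ m then acc.set (kv.2 - 1).toNat (some kv.1) else acc)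
        acc)[j]? =
      some (channels.foldl (fun acc kv => if kv.2 = ((j : Int) + 1) then some kv.1 else acc)
              (g ((j : Int) + 1))) := by
  induction channels generalizing acc g with
  | nil => exact hbase
  | cons kv rest ih =>
      intro j hj
      simp only [List.foldl_cons]
      by_cases hg : 1 ≤ kv.2 ∧ kv.2 ≤ m
      · rw [if_pos hg]
        have hstep : ∀ i : Nat, i < m.toNat →
            (acc.set (kv.2 - 1).toNat (some kv.1))[i]? =
            some ((fun v => if kv.2 = v then some kv.1 else g v) ((i : Int) + 1)) := by
          intro i hi
          rcases hg with ⟨h1, h2⟩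
          by_cases hji : i = (kv.2 - 1).toNat
          · rw [hji, List.getElem?_set_self (by omega)]
            simp only []
            rw [if_pos (by omega)]
          · rw [List.getElem?_set_ne (by omega)]
            simp only []
            rw [if_neg (by omega)]
            exact hbase i hi
        exact ih (acc.set (kv.2 - 1).toNat (some kv.1))
          (fun v => if kv.2 = v then some kv.1 else g v) (by simp [hlen]) hstep j hj
      · have hkey : ¬ kv.2 = ((j : Int) + 1) := by omega
        rw [if_neg hg, if_neg hkey]
        exact ih acc g hlen hbase j hj

theorem pvLastF_cons (p : Int × String) (l : List (Int × String)) (v : Int) (a : Option String) :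
    pvLastF (p :: l) v a = pvLastF l v (if p.1 = v then some p.2 else a) := rfl

-- no element matches v ⇒ the fold leaves the accumulator alone
theorem pvLastF_none (l : List (Int × String)) (v : Int) (a : Option String)
    (h : ∀ p ∈ l, p.1 ≠ v) : pvLastF l v a = a := by
  induction l generalizing a with
  | nil => rfl
  | cons p l ih =>
      rw [pvLastF_cons, if_neg (h p List.mem_cons_self)]
      exact ih _ (fun q hq => h q (List.mem_cons_of_mem _ hq))

-- last-match through a stable insertion: inserting x into a sorted list makes x the
-- last element with its own position.
theorem pvLastF_insertBy (x : Int × String) (ys : List (Int × String)) (v : Int) (a : Option String)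
    (hys : ys.Pairwise (fun p q => p.1 ≤ q.1)) :
    pvLastF (PySem.List.insertBy (fun p q => decide (p.1 < q.1)) x ys) v a =
      if x.1 = v then some x.2 else pvLastF ys v a := by
  induction ys generalizing a with
  | nil => simp [PySem.List.insertBy, pvLastF]
  | cons y ys ih =>
      rw [List.pairwise_cons] at hys
      by_cases hlt : x.1 < y.1
      · have hins : PySem.List.insertBy (fun p q => decide (p.1 < q.1)) x (y :: ys) =
            x :: y :: ys := by simp [PySem.List.insertBy, hlt]
        rw [hins, pvLastF_cons]
        by_cases hx : x.1 = v
        · rw [if_pos hx, if_pos hx]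
          exact pvLastF_none _ _ _ (fun q hq => by
            rcases List.mem_cons.1 hq with rfl | hq'
            · omega
            · have := hys.1 q hq'; omega)
        · rw [if_neg hx, if_neg hx, pvLastF_cons]
      · have hins : PySem.List.insertBy (fun p q => decide (p.1 < q.1)) x (y :: ys) =
            y :: PySem.List.insertBy (fun p q => decide (p.1 < q.1)) x ys := by
          simp [PySem.List.insertBy, hlt]
        rw [hins, pvLastF_cons, ih _ hys.2, pvLastF_cons]

-- stability: last-match over the stably sorted list is last-match over the original list
theorem pvLastF_sorted_aux (l pre : List (Int × String)) (v : Int) :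
    pvLastF (l.foldl (fun acc x => PySem.List.insertBy (fun p q => decide (p.1 < q.1)) x acc)
      (PySem.List.sorted pre (fun p => p.1) false)) v none =
    pvLastF l v (pvLastF (PySem.List.sorted pre (fun p => p.1) false) v none) := by
  induction l generalizing pre with
  | nil => rfl
  | cons x l ih =>
      simp only [List.foldl_cons, pvLastF_cons]
      have hsorted : PySem.List.insertBy (fun p q => decide (p.1 < q.1)) x
          (PySem.List.sorted pre (fun p => p.1) false) =
          PySem.List.sorted (pre ++ [x]) (fun p => p.1) false := by
        rw [PySem.List.sorted_eq_foldl_insertBy, PySem.List.sorted_eq_foldl_insertBy,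
          List.foldl_append]
        rfl
      rw [hsorted, ih (pre ++ [x]), ← hsorted,
        pvLastF_insertBy x _ v none (PySem.List.sorted_pairwise _ _)]

theorem pvLastF_sorted (l : List (Int × String)) (v : Int) :
    pvLastF (PySem.List.sorted l (fun p => p.1) false) v none = pvLastF l v none := by
  have h := pvLastF_sorted_aux l [] v
  rw [PySem.List.sorted_eq_foldl_insertBy]
  exact h

-- last-match over the filtered, swapped pairs = A's last-write-wins, for positions ≥ 1
theorem pvLastF_base (channels : List (String × Int)) (v : Int) (a : Option String)
    (hv : 1 ≤ v) :
    pvLastF ((channels.filter (fun kv => 1 ≤ kv.2)).map (fun kv => (kv.2, kv.1))) v a =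
      channels.foldl (fun acc kv => if kv.2 = v then some kv.1 else acc) a := by
  induction channels generalizing a with
  | nil => rfl
  | cons kv rest ih =>
      rw [List.foldl_cons, List.filter_cons]
      by_cases h1 : 1 ≤ kv.2
      · rw [if_pos (by simpa using h1), List.map_cons, pvLastF_cons]
        exact ih _
      · have hne : ¬ kv.2 = v := by omega
        rw [if_neg (by simpa using h1), if_neg hne]
        exact ih _

-- one scan step on a table of length L extends/overwrites it into the table of length p.1
theorem pvScanStepMap (f : Nat → Option String) (L : Nat) (p : Int × String)
    (hp1 : 1 ≤ p.1) (hL : (L : Int) ≤ p.1) (hnone : ∀ j, L ≤ j → f j = none) :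
    pvScanStep ((List.range L).map f) p =
      (List.range p.1.toNat).map
        (fun (j : Nat) => if p.1 = (j : Int) + 1 then some p.2 else f j) := by
  have hlen : ((List.range L).map f).length = L := by simp
  unfold pvScanStep
  rw [hlen]
  split_ifs with hcond
  · -- append case: L < p.1
    apply List.ext_getElem?
    intro j
    by_cases hjL : j < L
    · rw [List.getElem?_append_left (by simp; omega), List.getElem?_append_left (by simpa using hjL),
        List.getElem?_map, List.getElem?_range hjL, List.getElem?_map,
        List.getElem?_range (by omega), Option.map_some, Option.map_some,
        if_neg (by omega)]
    · by_cases hjM : j < p.1.toNat - 1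
      · rw [List.getElem?_append_left (by simp; omega),
          List.getElem?_append_right (by simpa using hjL), hlen, List.getElem?_replicate,
          if_pos (by omega), List.getElem?_map, List.getElem?_range (by omega), Option.map_some,
          if_neg (by omega), hnone j (by omega)]
      · by_cases hjE : j < p.1.toNat
        · rw [List.getElem?_append_right (by simp; omega), List.getElem?_map,
            List.getElem?_range hjE, Option.map_some, if_pos (by omega)]
          simp only [List.length_append, List.length_map, List.length_range,
            List.length_replicate]
          rw [show j - (L + (p.1 - 1 - (L : Int)).toNat) = 0 from by omega]
          rfl
        · rw [List.getElem?_eq_none (by simp; omega), List.getElem?_eq_none (by simp; omega)]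
  · -- overwrite case: p.1 = L
    have hLE : (L : Int) = p.1 := by omega
    apply List.ext_getElem?
    intro j
    by_cases hjL : j < L
    · by_cases hjE : j = L - 1
      · rw [hjE, List.getElem?_set_self (by simp; omega), List.getElem?_map,
          List.getElem?_range (by omega), Option.map_some, if_pos (by omega)]
      · rw [List.getElem?_set_ne (by omega), List.getElem?_map, List.getElem?_range hjL,
          List.getElem?_map, List.getElem?_range (by omega), Option.map_some, Option.map_some,
          if_neg (by omega)]
    · rw [List.getElem?_eq_none (by simp; omega), List.getElem?_eq_none (by simp; omega)]

-- B's scan over a sorted, all-≥1 list is the gap-padded last-match table,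
-- and every position in the list is bounded by the produced length.
theorem pvScanEq (s : List (Int × String))
    (hs : s.Pairwise (fun p q => p.1 ≤ q.1)) (h1 : ∀ p ∈ s, 1 ≤ p.1) :
    s.foldl pvScanStep [] =
      (List.range (pvLastIdx s)).map (fun (j : Nat) => pvLastF s ((j : Int) + 1) none) ∧
    ∀ p ∈ s, p.1 ≤ (pvLastIdx s : Int) := by
  induction s using List.reverseRecOn with
  | nil => exact ⟨rfl, by simp⟩
  | append_singleton s p ih =>
      rw [List.pairwise_append] at hs
      have hle : ∀ q ∈ s, q.1 ≤ p.1 := fun q hq => hs.2.2 q hq p (by simp)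
      have hp1 : 1 ≤ p.1 := h1 p (by simp)
      obtain ⟨hfold, hbound⟩ := ih hs.1 (fun q hq => h1 q (by simp [hq]))
      have hLI : pvLastIdx (s ++ [p]) = p.1.toNat := by simp [pvLastIdx]
      have hL : (pvLastIdx s : Int) ≤ p.1 := by
        cases hq : s.getLast? with
        | none => simp [pvLastIdx, hq]; omega
        | some ql =>
            have hmem := List.mem_of_getLast? hq
            have h2 := hle _ hmem
            have h3 := h1 _ (List.mem_append.2 (Or.inl hmem))
            simp only [pvLastIdx, hq, Option.map_some, Option.getD_some]
            omega
      have hlastF : ∀ v : Int, pvLastF (s ++ [p]) v none =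
          if p.1 = v then some p.2 else pvLastF s v none := by
        intro v
        simp only [pvLastF, List.foldl_append, List.foldl_cons, List.foldl_nil]
      have hnone : ∀ j, pvLastIdx s ≤ j → pvLastF s ((j : Int) + 1) none = none := by
        intro j hj
        exact pvLastF_none _ _ _ (fun q hq => by have := hbound q hq; omega)
      refine ⟨?_, ?_⟩
      · rw [List.foldl_append, List.foldl_cons, List.foldl_nil, hfold, hLI,
          pvScanStepMap (fun (j : Nat) => pvLastF s ((j : Int) + 1) none) (pvLastIdx s) p
            hp1 hL hnone]
        apply List.map_congr_left
        intro j _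
        rw [hlastF]
      · intro q hq
        rw [hLI]
        rcases List.mem_append.1 hq with hq | hq
        · have := hle q hq; omega
        · simp only [List.mem_singleton] at hq; subst hq; omega

-- ===== VERDICT (by name: the statement is the Claim_ definition above) =====
theorem get_channel_labels_spec : Claim_equal_get_channel_labels := by
  intro channels bipolar _
  unfold Spec_get_channel_labels get_channel_labels get_channel_labels_alt
  set m : Int :=
    if channels.isEmpty then 0
    else (PySem.List.max? (channels.map Prod.snd) (fun y => y)).getD 0 with hm
  set base : List (Int × String) :=
    (channels.filter (fun kv => 1 ≤ kv.2)).map (fun kv => (kv.2, kv.1)) with hbase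
  set pairs : List (Int × String) := PySem.List.sorted base (fun p => p.1) false with hpairs
  show (channels.foldl
      (fun acc kv =>
        if 1 ≤ kv.2 ∧ kv.2 ≤ m then acc.set (kv.2 - 1).toNat (some kv.1) else acc)
      (List.replicate m.toNat none)) = pairs.foldl pvScanStep []
  have hmax : ∀ kv ∈ channels, kv.2 ≤ m := by
    intro kv hkv
    have hne : ¬ channels.isEmpty := by
      cases channels with
      | nil => cases hkv
      | cons _ _ => simp
    have hne' : channels.map Prod.snd ≠ [] := by
      cases channels with
      | nil => cases hkv
      | cons _ _ => simp
    obtain ⟨mv, hmv⟩ : ∃ mv, PySem.List.max? (channels.map Prod.snd) (fun y => y) = some mv := by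
      cases h : PySem.List.max? (channels.map Prod.snd) (fun y => y) with
      | none => exact absurd ((PySem.List.max?_eq_none_iff _ _).1 h) hne'
      | some mv => exact ⟨mv, rfl⟩
    have := PySem.List.max?_isMax hmv kv.2 (List.mem_map.2 ⟨kv, hkv, rfl⟩)
    rw [hm, if_neg hne, hmv]
    simpa using this
  have hmem1 : ∀ p ∈ pairs, 1 ≤ p.1 := by
    intro p hp
    rw [hpairs, PySem.List.mem_sorted, hbase] at hp
    obtain ⟨kv, hkv, rfl⟩ := List.mem_map.1 hp
    simpa using List.of_mem_filter hkv
  have hmemm : ∀ p ∈ pairs, p.1 ≤ m := by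
    intro p hp
    rw [hpairs, PySem.List.mem_sorted, hbase] at hp
    obtain ⟨kv, hkv, rfl⟩ := List.mem_map.1 hp
    exact hmax kv (List.mem_of_mem_filter hkv)
  obtain ⟨hfold, hbound⟩ := pvScanEq pairs (PySem.List.sorted_pairwise _ _) hmem1
  have hLm : pvLastIdx pairs = m.toNat := by
    by_cases hm1 : 1 ≤ m
    · -- some entry attains the maximum m ≥ 1, so it survives the filter
      have hne : ¬ channels.isEmpty := by
        cases h : channels.isEmpty
        · simp
        · exfalso; rw [hm, if_pos h] at hm1; omega
      have hne' : channels.map Prod.snd ≠ [] := by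
        cases channels with
        | nil => simp at hne
        | cons _ _ => simp
      obtain ⟨mv, hmv⟩ : ∃ mv, PySem.List.max? (channels.map Prod.snd) (fun y => y) = some mv := by
        cases h : PySem.List.max? (channels.map Prod.snd) (fun y => y) with
        | none => exact absurd ((PySem.List.max?_eq_none_iff _ _).1 h) hne'
        | some mv => exact ⟨mv, rfl⟩
      have hmeq : m = mv := by rw [hm, if_neg hne, hmv]; rfl
      obtain ⟨kv, hkv, hkv2⟩ := List.mem_map.1 (PySem.List.max?_mem hmv)
      have hmemp : (m, kv.1) ∈ pairs := by
        rw [hpairs, PySem.List.mem_sorted, hbase]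
        exact List.mem_map.2 ⟨kv, List.mem_filter.2 ⟨hkv, by simp; omega⟩,
          by simp [hkv2, hmeq]⟩
      have hub := hbound _ hmemp
      have hpne : pairs ≠ [] := List.ne_nil_of_mem hmemp
      obtain ⟨ql, hql⟩ : ∃ ql, pairs.getLast? = some ql := by
        cases hq : pairs.getLast? with
        | none => exact absurd (List.getLast?_eq_none_iff.1 hq) hpne
        | some ql => exact ⟨ql, rfl⟩
      have hqmem : ql ∈ pairs := List.mem_of_getLast? hql
      have h4 : pvLastIdx pairs = ql.1.toNat := by simp [pvLastIdx, hql]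
      have h5 := hmemm ql hqmem
      have h6 := hmem1 ql hqmem
      rw [h4] at hub ⊢
      simp only at hub
      omega
    · -- m < 1: nothing survives the filter
      have hbe : base = [] := by
        rw [hbase, List.map_eq_nil_iff, List.filter_eq_nil_iff]
        intro kv hkv
        have := hmax kv hkv
        simp only [decide_eq_true_eq]
        omega
      have hpe : pairs = [] := by rw [hpairs, hbe]; rfl
      rw [hpe]
      simp only [pvLastIdx, List.getLast?_nil, Option.map_none, Option.getD_none]
      omega
  rw [hfold, hLm]
  apply List.ext_getElem?
  intro j
  by_cases hj : j < m.toNat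
  · rw [pvFillInv m channels _ (fun _ => none) (by simp) (fun i hi => by simp [hi]) j hj,
      List.getElem?_map, List.getElem?_range hj, Option.map_some]
    have hstab : pvLastF pairs ((j : Int) + 1) none =
        channels.foldl (fun acc kv => if kv.2 = ((j : Int) + 1) then some kv.1 else acc)
          none := by
      rw [hpairs, pvLastF_sorted, hbase, pvLastF_base channels _ none (by omega)]
    rw [hstab]
  · rw [List.getElem?_eq_none (by rw [pvFillLen]; simp; omega),
      List.getElem?_eq_none (by simp; omega)]
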